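-- pv_equiv track=rewrite | github.com/mko3000/tira | tira_vk2/alternation.py | count
-- ===== SOURCE A (Python) =====
-- def sequenceSubStrings(sublen):
--     length = 0
--     for i in range(sublen):
--         length += i+1
--     return length
--
-- def count(t):
--     counter = 1
--     alteringLenght = 2
--     for i in range (2, len(t)):
--         if (t[i]>t[i-1] and t[i-1]<t[i-2]) or (t[i]<t[i-1] and t[i-1]>t[i-2]):
--             alteringLenght += 1
--         else:
--             counter += sequenceSubStrings(alteringLenght)-1
--             alteringLenght = 2
--     counter += sequenceSubStrings(alteringLenght)-1
--
--     return counter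
-- ===== SOURCE B (Python) =====
-- def count(t):
--     total = 1
--     run = 2
--     for a, b, c in zip(t, t[1:], t[2:]):
--         if (c > b and b < a) or (c < b and b > a):
--             run += 1
--         else:
--             total += run * (run + 1) // 2 - 1
--             run = 2
--     total += run * (run + 1) // 2 - 1
--     return total
-- ===== Notes on version B (the rewrite author's own statement) =====
-- stated objective: faster
-- what changed: B drops the index loop and the triangular-sum helper: it iterates over the zipped adjacent triples of the list and adds the closed form run*(run+1)//2 - 1 per run, instead of re-summing 1..run with an inner loop at each run boundary.
import Mathlib
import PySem

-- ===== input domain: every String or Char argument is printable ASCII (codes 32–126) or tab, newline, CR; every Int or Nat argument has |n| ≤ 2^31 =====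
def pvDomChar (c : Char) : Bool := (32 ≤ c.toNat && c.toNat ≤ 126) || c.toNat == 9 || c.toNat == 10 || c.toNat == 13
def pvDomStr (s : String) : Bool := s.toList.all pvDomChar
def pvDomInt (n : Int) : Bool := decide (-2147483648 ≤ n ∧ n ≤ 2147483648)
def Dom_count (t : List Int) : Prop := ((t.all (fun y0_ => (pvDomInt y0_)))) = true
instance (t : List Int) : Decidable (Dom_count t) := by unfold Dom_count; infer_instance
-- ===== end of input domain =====

set_option maxRecDepth 4000


-- B iterates over the zipped adjacent triples of the list and uses the closed form
-- run*(run+1)//2-1 per run, replacing A's index loop and its triangular-sum helper;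
-- same return value on every input.

-- ===== PORT A =====
def sequenceSubStrings (sublen : Int) : Int :=
  (PySem.List.pyRange 0 sublen 1).foldl (fun length i => length + (i + 1)) 0

def count (t : List Int) : Int :=
  let st := (PySem.List.pyRange 2 (t.length : Int) 1).foldl
    (fun (s : Int × Int) (i : Int) =>
      if (PySem.List.pyGetD t i 0 > PySem.List.pyGetD t (i-1) 0 ∧
            PySem.List.pyGetD t (i-1) 0 < PySem.List.pyGetD t (i-2) 0) ∨
         (PySem.List.pyGetD t i 0 < PySem.List.pyGetD t (i-1) 0 ∧
            PySem.List.pyGetD t (i-1) 0 > PySem.List.pyGetD t (i-2) 0)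
      then (s.1, s.2 + 1)
      else (s.1 + (sequenceSubStrings s.2 - 1), 2)) (1, 2)
  st.1 + (sequenceSubStrings st.2 - 1)

-- ===== PORT B =====
-- the 'for a, b, c in zip(t, t[1:], t[2:])' loop as tail recursion over the triple list;
-- t[1:]/t[2:] are exactly List.drop 1 / 2 for these nonnegative slice starts
def countGo : List (Int × Int × Int) → Int → Int → Int
  | [], total, run => total + (PySem.Int.floordiv (run * (run + 1)) 2 - 1)
  | p :: ps, total, run =>
      if (p.2.2 > p.2.1 ∧ p.2.1 < p.1) ∨ (p.2.2 < p.2.1 ∧ p.2.1 > p.1)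
      then countGo ps total (run + 1)
      else countGo ps (total + (PySem.Int.floordiv (run * (run + 1)) 2 - 1)) 2

def count_alt (t : List Int) : Int :=
  countGo (t.zip ((t.drop 1).zip (t.drop 2))) 1 2

-- ===== PRECONDITION & SPEC =====
def Spec_count (t : List Int) (out : Int) : Prop := out = count_alt t
instance (t : List Int) (out : Int) : Decidable (Spec_count t out) := by unfold Spec_count; infer_instance

-- ===== CLAIM =====
def Claim_equal_count : Prop := ∀ (t : List Int), Dom_count t → Spec_count t (count t)

-- ===== LEMMAS AND PROOFS =====

-- A's loop body, named for the proofs (definitionally equal to the lambda in `count`)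
def loopA (t : List Int) (s : Int × Int) (i : Int) : Int × Int :=
  if (PySem.List.pyGetD t i 0 > PySem.List.pyGetD t (i-1) 0 ∧
        PySem.List.pyGetD t (i-1) 0 < PySem.List.pyGetD t (i-2) 0) ∨
     (PySem.List.pyGetD t i 0 < PySem.List.pyGetD t (i-1) 0 ∧
        PySem.List.pyGetD t (i-1) 0 > PySem.List.pyGetD t (i-2) 0)
  then (s.1, s.2 + 1)
  else (s.1 + (sequenceSubStrings s.2 - 1), 2)

-- sum(1..(r+1)) = sum(1..r) + (r+1) for 0 ≤ r
lemma seq_succ (r : Int) (h : 0 ≤ r) :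
    sequenceSubStrings (r + 1) = sequenceSubStrings r + (r + 1) := by
  unfold sequenceSubStrings
  rw [PySem.List.pyRange_one_succ_right h, List.foldl_append]
  simp

lemma seq_double (n : Nat) : 2 * sequenceSubStrings (n : Int) = (n : Int) * ((n : Int) + 1) := by
  induction n with
  | zero => decide
  | succ k ih =>
    push_cast
    rw [seq_succ (k : Int) (by positivity)]
    push_cast at ih
    linarith

-- the helper's triangular sum equals the closed form used by B
lemma seq_closed (r : Int) (h : 0 ≤ r) :
    PySem.Int.floordiv (r * (r + 1)) 2 = sequenceSubStrings r := by
  have hn : r = ((r.toNat : Nat) : Int) := by omega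
  rw [PySem.Int.floordiv_eq_ediv_of_pos (by omega)]
  have h2 := seq_double r.toNat
  rw [← hn] at h2
  omega

-- invariant: from any state with run ≥ 2, A's remaining index loop (on the suffix from j)
-- plus its final triangular addition equals B's recursion over the remaining triples
lemma bridge (t : List Int) : ∀ (k j : Nat) (s : Int × Int),
    t.length ≤ j + 2 + k → 2 ≤ s.2 →
    ((PySem.List.pyRange ((j : Int) + 2) (t.length : Int) 1).foldl (loopA t) s).1
      + (sequenceSubStrings ((PySem.List.pyRange ((j : Int) + 2) (t.length : Int) 1).foldl (loopA t) s).2 - 1)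
    = countGo ((t.drop j).zip ((t.drop (j+1)).zip (t.drop (j+2)))) s.1 s.2 := by
  intro k
  induction k with
  | zero =>
    intro j s hlen hrun
    rw [PySem.List.pyRange_one_eq_nil (by omega),
      List.drop_eq_nil_of_le (show t.length ≤ j + 2 by omega)]
    simp only [List.zip_nil_right, List.foldl_nil, countGo]
    rw [seq_closed s.2 (by omega)]
  | succ k ih =>
    intro j s hlen hrun
    by_cases h : t.length ≤ j + 2
    · rw [PySem.List.pyRange_one_eq_nil (by omega), List.drop_eq_nil_of_le h]
      simp only [List.zip_nil_right, List.foldl_nil, countGo]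
      rw [seq_closed s.2 (by omega)]
    · have hj2 : j + 2 < t.length := by omega
      have hj1 : j + 1 < t.length := by omega
      have hj0 : j < t.length := by omega
      have g0 : PySem.List.pyGetD t ((j : Int) + 2 - 2) 0 = t[j] := by
        rw [show ((j : Int) + 2 - 2) = (j : Int) by ring,
          PySem.List.pyGetD_eq_getElem t 0 (by omega) (by exact_mod_cast hj0)]
        simp
      have g1 : PySem.List.pyGetD t ((j : Int) + 2 - 1) 0 = t[j+1] := by
        rw [show ((j : Int) + 2 - 1) = ((j + 1 : Nat) : Int) by push_cast; ring,
          PySem.List.pyGetD_eq_getElem t 0 (by omega) (by exact_mod_cast hj1)]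
        simp
      have g2 : PySem.List.pyGetD t ((j : Int) + 2) 0 = t[j+2] := by
        rw [show ((j : Int) + 2) = ((j + 2 : Nat) : Int) by push_cast; ring,
          PySem.List.pyGetD_eq_getElem t 0 (by omega) (by exact_mod_cast hj2)]
        have h2 : ((j : Int) + 2).toNat = j + 2 := by omega
        simp [h2]
      have hbody : loopA t s ((j : Int) + 2)
          = if (t[j+2] > t[j+1] ∧ t[j+1] < t[j]) ∨ (t[j+2] < t[j+1] ∧ t[j+1] > t[j])
            then (s.1, s.2 + 1)
            else (s.1 + (sequenceSubStrings s.2 - 1), 2) := by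
        unfold loopA
        rw [g0, g1, g2]
      have hz : (t.drop j).zip ((t.drop (j+1)).zip (t.drop (j+2)))
          = (t[j], (t[j+1], t[j+2]))
              :: (t.drop (j+1)).zip ((t.drop (j+2)).zip (t.drop (j+3))) := by
        have hd0 : t.drop j = t[j] :: t.drop (j+1) := List.drop_eq_getElem_cons hj0
        have hd1 : t.drop (j+1) = t[j+1] :: t.drop (j+2) := List.drop_eq_getElem_cons hj1
        have hd2 : t.drop (j+2) = t[j+2] :: t.drop (j+3) := List.drop_eq_getElem_cons hj2
        conv_lhs => rw [hd0, hd1, hd2]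
        conv_rhs => rw [hd1, hd2]
        simp only [List.zip_cons_cons]
      rw [PySem.List.pyRange_one_cons (by exact_mod_cast hj2)]
      simp only [List.foldl_cons]
      rw [hbody, hz]
      have hstep : ((j : Int) + 2 + 1) = (((j + 1 : Nat) : Int) + 2) := by push_cast; ring
      by_cases hc : (t[j+2] > t[j+1] ∧ t[j+1] < t[j]) ∨ (t[j+2] < t[j+1] ∧ t[j+1] > t[j])
      · rw [if_pos hc]
        simp only [countGo]
        rw [if_pos hc]
        have := ih (j+1) (s.1, s.2 + 1) (by omega) (by simp only []; omega)
        rw [hstep]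
        exact this
      · rw [if_neg hc]
        simp only [countGo]
        rw [if_neg hc, seq_closed s.2 (by omega)]
        have := ih (j+1) (s.1 + (sequenceSubStrings s.2 - 1), 2) (by omega) (by norm_num)
        rw [hstep]
        exact this

-- ===== VERDICT =====
theorem count_spec : Claim_equal_count := by
  intro t _
  unfold Spec_count count count_alt
  have h := bridge t t.length 0 (1, 2) (by omega) (by norm_num)
  simp only [Nat.cast_zero, zero_add, List.drop_zero] at h
  exact h
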